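-- pv_equiv track=rewrite | github.com/JGMEYER/advent-of-code | 2021/day17.py | _possible_y_v0
-- ===== SOURCE A (Python) =====
-- from typing import NamedTuple
--
-- PossibleYVelData = NamedTuple(
--     "PossibleYVelData",
--     [("y_v0", int), ("t", int)],
-- )
--
-- def _possible_y_v0(y_min, y_max):
--     y_v0, t = 0, 1
--     possible_y_v0 = []
--
--     # HACK: Brute force large window cuz I'm tired
--     for y_v0 in range(-1000, 1000):
--         y, y_v = 0, y_v0
--         for t in range(1, 1001):
--             y += y_v
--             if y_min <= y <= y_max:
--                 possible_y_v0.append(PossibleYVelData(y_v0, t))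
--             if y < y_min:
--                 break
--             y_v -= 1
--
--     return possible_y_v0
-- ===== SOURCE B (Python) =====
-- from typing import NamedTuple
--
-- PossibleYVelData = NamedTuple(
--     "PossibleYVelData",
--     [("y_v0", int), ("t", int)],
-- )
--
-- def _possible_y_v0(y_min, y_max):
--     # Closed form instead of simulation: y(t) = t*y_v0 - t*(t-1)//2.  The
--     # height sequence is concave, so the simulation's early break never cuts
--     # away a time at which the probe is back inside the band: a velocity
--     # y_v0 >= y_min contributes exactly the t in [1, 1000] with
--     # y_min <= y(t) <= y_max, and a velocity y_v0 < y_min contributes nothing.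
--     result = []
--     for y_v0 in range(max(-1000, y_min), 1000):
--         for t in range(1, 1001):
--             y = t * y_v0 - t * (t - 1) // 2
--             if y_min <= y <= y_max:
--                 result.append(PossibleYVelData(y_v0, t))
--     return result
-- ===== Notes on version B (the rewrite author's own statement) =====
-- stated objective: simpler
-- what changed: Replaces the per-velocity step-by-step trajectory simulation (mutable y/y_v accumulators with an early break) by the closed-form height y(t) = t*y_v0 - t*(t-1)//2 tested directly for each t, skipping velocities below y_min, justified by concavity of the height sequence.
import Mathlib
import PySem

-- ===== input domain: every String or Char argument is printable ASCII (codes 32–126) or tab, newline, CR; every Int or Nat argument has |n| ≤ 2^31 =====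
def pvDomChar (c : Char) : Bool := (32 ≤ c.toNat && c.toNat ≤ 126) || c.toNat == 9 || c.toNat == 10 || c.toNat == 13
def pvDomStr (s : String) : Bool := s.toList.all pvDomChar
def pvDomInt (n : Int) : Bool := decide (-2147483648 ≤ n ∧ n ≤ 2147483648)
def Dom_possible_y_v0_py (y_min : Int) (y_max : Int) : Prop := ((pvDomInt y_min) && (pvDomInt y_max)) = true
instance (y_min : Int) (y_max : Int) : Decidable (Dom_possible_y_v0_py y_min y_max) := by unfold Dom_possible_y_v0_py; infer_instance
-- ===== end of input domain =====

-- B replaces A's step-by-step trajectory simulation (mutable y/y_v with an early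
-- break) by testing the closed-form height y(t) = t*y_v0 - t*(t-1)//2 directly,
-- skipping velocities below y_min; objective: simpler.

-- ===== PORT A =====
-- A's inner 'for t in range(1, 1001): …' loop, with its break
def pyInnerA (y_min : Int) (y_max : Int) (y_v0 : Int) : Nat → Int → Int → Int → List (Int × Int) → List (Int × Int)
  | 0, _t, _y, _y_v, acc => acc
  | (f+1), t, y, y_v, acc =>
    let y' := y + y_v
    let acc' := if y_min ≤ y' ∧ y' ≤ y_max then acc ++ [(y_v0, t)] else acc
    if y' < y_min then acc'
    else pyInnerA y_min y_max y_v0 f (t + 1) y' (y_v - 1) acc'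

def possible_y_v0_py (y_min : Int) (y_max : Int) : List (Int × Int) :=
  (PySem.List.pyRange (-1000) 1000 1).foldl
    (fun acc y_v0 => pyInnerA y_min y_max y_v0 1000 1 0 y_v0 acc) []

-- ===== PORT B =====
-- body of B's inner 'for t in range(1, 1001): …' loop
def altInner (y_min : Int) (y_max : Int) (y_v0 : Int) (acc : List (Int × Int)) (t : Int) : List (Int × Int) :=
  let y := t * y_v0 - PySem.Int.floordiv (t * (t - 1)) 2
  if y_min ≤ y ∧ y ≤ y_max then acc ++ [(y_v0, t)] else acc

def possible_y_v0_py_alt (y_min : Int) (y_max : Int) : List (Int × Int) :=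
  (PySem.List.pyRange (max (-1000) y_min) 1000 1).foldl
    (fun acc y_v0 => (PySem.List.pyRange 1 1001 1).foldl (altInner y_min y_max y_v0) acc) []

-- ===== PRECONDITION & SPEC =====
def Spec_possible_y_v0_py (y_min : Int) (y_max : Int) (out : List (Int × Int)) : Prop := out = possible_y_v0_py_alt y_min y_max
instance (y_min : Int) (y_max : Int) (out : List (Int × Int)) : Decidable (Spec_possible_y_v0_py y_min y_max out) := by unfold Spec_possible_y_v0_py; infer_instance

-- ===== CLAIM (what is proved, stated in full; the proofs are below) =====
def Claim_equal_possible_y_v0_py : Prop := ∀ (y_min : Int) (y_max : Int), Dom_possible_y_v0_py y_min y_max → Spec_possible_y_v0_py y_min y_max (possible_y_v0_py y_min y_max)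

-- ===== LEMMAS AND PROOFS =====

-- the closed-form height after t steps, as B computes it
def yF (v t : Int) : Int := t * v - PySem.Int.floordiv (t * (t - 1)) 2

lemma ydiv (t : Int) : 2 * PySem.Int.floordiv (t * (t - 1)) 2 = t * (t - 1) := by
  rw [PySem.Int.floordiv_eq_ediv_of_pos (by norm_num)]
  have he : Even (t * (t - 1)) := by
    have := Int.even_mul_succ_self (t - 1)
    simpa [mul_comm] using this
  have h2 : t * (t - 1) % 2 = 0 := Int.even_iff.mp he
  omega

lemma yF_zero (v : Int) : yF v 0 = 0 := by
  norm_num [yF, PySem.Int.floordiv]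

lemma yF_succ (v t : Int) : yF v (t + 1) = yF v t + (v - t) := by
  unfold yF
  have h1 := ydiv (t + 1)
  have h2 := ydiv t
  nlinarith [h1, h2]

lemma yF_break (y_min v s t : Int) (h1 : y_min ≤ v) (hs : 1 ≤ s)
    (hb : yF v s < y_min) (ht : s ≤ t) : yF v t < y_min := by
  have e1 := ydiv s
  have e2 := ydiv t
  have f1 : 2 * yF v s = 2 * s * v - s * (s - 1) := by unfold yF; nlinarith [e1]
  have f2 : 2 * yF v t = 2 * t * v - t * (t - 1) := by unfold yF; nlinarith [e2]
  have hfac : (s - 1) * (2 * v - s) < 0 := by nlinarith [f1, hb, h1]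
  have hs2 : 2 * v - s < 0 := by
    rcases lt_or_ge (2 * v - s) 0 with h | h
    · exact h
    · exfalso; nlinarith [hfac, hs]
  have hkey : (t - s) * (2 * v - t - s + 1) ≤ 0 := by nlinarith [ht, hs2, hs]
  nlinarith [f1, f2, hkey, hb]

lemma altInner_eq (y_min y_max v : Int) (acc : List (Int × Int)) (t : Int) :
    altInner y_min y_max v acc t =
      (if y_min ≤ yF v t ∧ yF v t ≤ y_max then acc ++ [(v, t)] else acc) := rfl

lemma foldl_keep {α β : Type} (l : List β) (acc : α) :
    l.foldl (fun a _ => a) acc = acc := by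
  induction l <;> simp_all [List.foldl]

lemma pyInnerA_step (y_min y_max v : Int) (f : Nat) (t y yv : Int) (acc : List (Int × Int)) :
    pyInnerA y_min y_max v (f+1) t y yv acc =
      if y + yv < y_min then (if y_min ≤ y + yv ∧ y + yv ≤ y_max then acc ++ [(v, t)] else acc)
      else pyInnerA y_min y_max v f (t+1) (y+yv) (yv-1)
        (if y_min ≤ y + yv ∧ y + yv ≤ y_max then acc ++ [(v, t)] else acc) := rfl

-- A's inner simulation loop agrees with B's closed-form scan of the remaining times
lemma inner_eq (y_min y_max v : Int) (hv : y_min ≤ v) :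
    ∀ (fuel : Nat) (s : Int) (acc : List (Int × Int)), 0 ≤ s →
      (∀ t', 1 ≤ t' → t' ≤ s → y_min ≤ yF v t') →
      pyInnerA y_min y_max v fuel (s + 1) (yF v s) (v - s) acc
        = (PySem.List.pyRange (s + 1) (s + 1 + fuel) 1).foldl (altInner y_min y_max v) acc := by
  intro fuel
  induction fuel with
  | zero =>
    intro s acc _ _
    rw [PySem.List.pyRange_one_eq_nil (by push_cast; omega)]
    rfl
  | succ f ih =>
    intro s acc hs hinv
    have hy' : yF v s + (v - s) = yF v (s + 1) := (yF_succ v s).symm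
    rw [pyInnerA_step, hy']
    push_cast
    by_cases hbr : yF v (s + 1) < y_min
    · rw [if_pos hbr, if_neg (by omega)]
      symm
      have hcong : List.foldl (altInner y_min y_max v) acc (PySem.List.pyRange (s + 1) (s + 1 + ((f:Int) + 1)) 1)
          = List.foldl (fun a _ => a) acc (PySem.List.pyRange (s + 1) (s + 1 + ((f:Int) + 1)) 1) :=
        PySem.List.foldl_congr_mem _ _ _ _ (by
          intro acc' t htmem
          have hmem := (PySem.List.mem_pyRange_one).mp htmem
          have hlt : yF v t < y_min := yF_break y_min v (s + 1) t hv (by omega) hbr (by omega)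
          rw [altInner_eq, if_neg (by omega)])
      rw [hcong, foldl_keep]
    · rw [if_neg hbr]
      have hacc : (if y_min ≤ yF v (s+1) ∧ yF v (s+1) ≤ y_max then acc ++ [(v, s+1)] else acc)
          = altInner y_min y_max v acc (s+1) := (altInner_eq y_min y_max v acc (s+1)).symm
      rw [show v - s - 1 = v - (s + 1) from by ring, hacc]
      rw [show s + 1 + ((f:Int) + 1) = s + 1 + 1 + (f:Int) from by ring]
      rw [PySem.List.pyRange_one_cons (by omega), List.foldl_cons]
      exact ih (s + 1) _ (by omega)
        (by intro t' ha hb3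
            by_cases he : t' = s + 1
            · subst he; omega
            · exact hinv t' ha (by omega))

-- a velocity below y_min contributes nothing in A (break at t = 1, nothing appended)
lemma innerA_lt (y_min y_max v : Int) (acc : List (Int × Int)) (hv : v < y_min) :
    pyInnerA y_min y_max v 1000 1 0 v acc = acc := by
  rw [show (1000 : Nat) = 999 + 1 from rfl, pyInnerA_step]
  rw [if_pos (by omega), if_neg (by omega)]

lemma inner_top (y_min y_max v : Int) (hv : y_min ≤ v) (acc : List (Int × Int)) :
    pyInnerA y_min y_max v 1000 1 0 v acc
      = (PySem.List.pyRange 1 1001 1).foldl (altInner y_min y_max v) acc := by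
  have h := inner_eq y_min y_max v hv 1000 0 acc (le_refl 0) (by intro t' h1 h2; omega)
  rw [yF_zero] at h
  norm_num at h
  exact h

lemma main_eq (y_min y_max : Int) :
    possible_y_v0_py y_min y_max = possible_y_v0_py_alt y_min y_max := by
  unfold possible_y_v0_py possible_y_v0_py_alt
  have hm1 : (-1000 : Int) ≤ max (-1000) y_min := le_max_left _ _
  have hm2 : y_min ≤ max (-1000) y_min := le_max_right _ _
  have hc1 : (-1000 : Int) ≤ min (max (-1000) y_min) 1000 := le_min hm1 (by norm_num)
  have hc2 : min (max (-1000) y_min) 1000 ≤ (1000 : Int) := min_le_right _ _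
  have hc3 : min (max (-1000) y_min) 1000 ≤ max (-1000) y_min := min_le_left _ _
  -- B's range equals the clamped range
  have hrangeB : PySem.List.pyRange (max (-1000) y_min) 1000 1
      = PySem.List.pyRange (min (max (-1000) y_min) 1000) 1000 1 := by
    rcases le_or_gt (max (-1000) y_min) 1000 with h | h
    · rw [min_eq_left h]
    · rw [PySem.List.pyRange_one_eq_nil (le_of_lt h),
        PySem.List.pyRange_one_eq_nil (by omega)]
  rw [hrangeB]
  rw [PySem.List.pyRange_one_append (-1000) (min (max (-1000) y_min) 1000) 1000 hc1 hc2,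
    List.foldl_append]
  -- dead prefix: velocities below y_min contribute nothing
  have hdead : List.foldl (fun acc y_v0 => pyInnerA y_min y_max y_v0 1000 1 0 y_v0 acc)
      ([] : List (Int × Int)) (PySem.List.pyRange (-1000) (min (max (-1000) y_min) 1000) 1)
      = [] := by
    rw [PySem.List.foldl_congr_mem _ _ (fun a (_ : Int) => a) _
      (by intro acc v hvmem
          have hmem := (PySem.List.mem_pyRange_one).mp hvmem
          have hvlt : v < y_min := by
            rcases max_choice (-1000 : Int) y_min with hm | hm <;> omega
          exact innerA_lt y_min y_max v acc hvlt)]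
    rw [foldl_keep]
  rw [hdead]
  refine PySem.List.foldl_congr_mem _ _ _ _ ?_
  intro acc v hvmem
  have hmem := (PySem.List.mem_pyRange_one).mp hvmem
  have hvge : y_min ≤ v := by
    rcases max_choice (-1000 : Int) y_min with hm | hm <;>
      rcases min_choice (max (-1000 : Int) y_min) 1000 with hc | hc <;> omega
  exact inner_top y_min y_max v hvge acc

-- ===== VERDICT (by name: the statement is the Claim_ definition above) =====
theorem possible_y_v0_py_spec : Claim_equal_possible_y_v0_py := by
  intro y_min y_max _
  unfold Spec_possible_y_v0_py
  exact main_eq y_min y_max
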